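-- pv_equiv track=rewrite | github.com/GitProger/ITMO-CT-dm-labs | 1/A.py | get
-- ===== SOURCE A (Python) =====
-- def get(a):
--     n = len(a)
--     refl, aref, sim, asim, tr = 1, 1, 1, 1, 1
--     for i in range(n):
--         for j in range(n):
--             if a[i][i]:
--                 aref = 0
--             else:
--                 refl = 0
--             if a[i][j]:
--                 if i != j:
--                     if not a[j][i]:
--                         sim = 0
--                     if a[j][i]:
--                         asim = 0
--             if tr and not a[i][j]:
--                 for k in range(n):
--                     if a[i][k] and a[k][j]:
--                         tr = 0
--                         break
--     return refl, aref, sim, asim, tr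
-- ===== SOURCE B (Python) =====
-- def get(a):
--     n = len(a)
--     diag = [a[i][i] != 0 for i in range(n)]
--     refl = 1 if all(diag) else 0
--     aref = 0 if any(diag) else 1
--     sim, asim = 1, 1
--     for i in range(n):
--         for j in range(i):
--             x = a[i][j] != 0
--             y = a[j][i] != 0
--             if x != y:
--                 sim = 0
--             if x and y:
--                 asim = 0
--     masks = []
--     for i in range(n):
--         m = 0
--         for j in range(n):
--             if a[i][j]:
--                 m |= 1 << j
--         masks.append(m)
--     tr = 1
--     for i in range(n):
--         reach = 0
--         for k in range(n):
--             if masks[i] >> k & 1: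
--                 reach |= masks[k]
--         if reach | masks[i] != masks[i]:
--             tr = 0
--     return refl, aref, sim, asim, tr
-- ===== Notes on version B (the rewrite author's own statement) =====
-- stated objective: alternative
-- what changed: Replaces A's guarded O(n^3) triple loop by a single diagonal pass for (anti)reflexivity, one pass over unordered pairs j<i for (anti)symmetry, and bitset row masks with a reach-union/subset test for transitivity.
import Mathlib
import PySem

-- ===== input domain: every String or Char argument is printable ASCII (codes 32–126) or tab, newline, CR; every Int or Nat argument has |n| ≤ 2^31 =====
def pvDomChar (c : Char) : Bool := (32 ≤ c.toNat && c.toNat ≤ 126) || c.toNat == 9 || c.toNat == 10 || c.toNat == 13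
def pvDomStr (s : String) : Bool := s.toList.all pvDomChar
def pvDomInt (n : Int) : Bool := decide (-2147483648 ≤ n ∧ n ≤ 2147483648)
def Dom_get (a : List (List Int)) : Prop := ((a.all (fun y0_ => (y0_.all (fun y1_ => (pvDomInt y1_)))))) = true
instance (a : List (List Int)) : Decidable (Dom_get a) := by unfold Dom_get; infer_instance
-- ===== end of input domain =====

-- B replaces A's O(n^3) guarded triple loop by one diagonal pass, a pass over unordered
-- pairs for (anti)symmetry, and bitset row masks with a reachability/subset test for
-- transitivity (alternative algorithm; B is not claimed faster).


-- ===== PORT A =====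
-- a[i][j]; exact under Pre_get (all indices used are in range, so the getD defaults are never taken)
def ent (a : List (List Int)) (i j : Nat) : Int := (a.getD i []).getD j 0

-- body of A's inner `for j in range(n)` loop; state = (refl, aref, sim, asim, tr)
def stepA (a : List (List Int)) (n i : Nat) (s : Int × Int × Int × Int × Int) (j : Nat) :
    Int × Int × Int × Int × Int :=
  (if ent a i i ≠ 0 then s.1 else 0,
   if ent a i i ≠ 0 then 0 else s.2.1,
   if ent a i j ≠ 0 ∧ i ≠ j ∧ ¬ent a j i ≠ 0 then 0 else s.2.2.1,
   if ent a i j ≠ 0 ∧ i ≠ j ∧ ent a j i ≠ 0 then 0 else s.2.2.2.1,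
   -- `for k in range(n): … break` sets tr to 0 iff some k hits
   if s.2.2.2.2 ≠ 0 ∧ ¬ent a i j ≠ 0 ∧ (∃ k ∈ List.range n, ent a i k ≠ 0 ∧ ent a k j ≠ 0)
     then 0 else s.2.2.2.2)

def get (a : List (List Int)) : Int × Int × Int × Int × Int :=
  let n := a.length
  (List.range n).foldl (fun s i => (List.range n).foldl (stepA a n i) s) (1, 1, 1, 1, 1)

-- ===== PORT B =====
-- body of B's `for j in range(i)` loop; state = (sim, asim); `x != y` on bools is the xor below
def stepBsym (a : List (List Int)) (i : Nat) (p : Int × Int) (j : Nat) : Int × Int :=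
  (if ¬((ent a i j ≠ 0) ↔ (ent a j i ≠ 0)) then 0 else p.1,
   if ent a i j ≠ 0 ∧ ent a j i ≠ 0 then 0 else p.2)

-- row i of the relation as a bitmask
def maskB (a : List (List Int)) (n i : Nat) : Nat :=
  (List.range n).foldl (fun m j => if ent a i j ≠ 0 then m ||| (1 <<< j) else m) 0

-- body of B's transitivity loop
def stepBtr (n : Nat) (masks : List Nat) (t : Int) (i : Nat) : Int :=
  let reach := (List.range n).foldl
    (fun r k => if (masks.getD i 0) >>> k &&& 1 ≠ 0 then r ||| masks.getD k 0 else r) 0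
  if reach ||| masks.getD i 0 ≠ masks.getD i 0 then 0 else t

def get_alt (a : List (List Int)) : Int × Int × Int × Int × Int :=
  let n := a.length
  let diag := (List.range n).map (fun i => decide (ent a i i ≠ 0))
  let refl : Int := if diag.all (fun b => b) then 1 else 0
  let aref : Int := if diag.any (fun b => b) then 0 else 1
  let sa := (List.range n).foldl (fun p i => (List.range i).foldl (stepBsym a i) p) ((1 : Int), (1 : Int))
  let masks := (List.range n).map (maskB a n)
  let tr := (List.range n).foldl (stepBtr n masks) 1
  (refl, aref, sa.1, sa.2, tr)

-- ===== PRECONDITION & SPEC =====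
-- Pre_get: every row is at least as long as the matrix has rows; on shorter (ragged) rows
-- Python A raises IndexError, so those inputs are excluded.
def Pre_get (a : List (List Int)) : Prop := ∀ row ∈ a, a.length ≤ row.length
instance (a : List (List Int)) : Decidable (Pre_get a) := by unfold Pre_get; infer_instance
def pvWitness_get : List (List Int) := [[1, 0], [0, 1]]

def Spec_get (a : List (List Int)) (out : Int × Int × Int × Int × Int) : Prop := out = get_alt a
instance (a : List (List Int)) (out : Int × Int × Int × Int × Int) : Decidable (Spec_get a out) := by unfold Spec_get; infer_instance

-- ===== CLAIM (what is proved, stated in full; the proofs are below) =====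
def Claim_equal_get : Prop := ∀ (a : List (List Int)), Dom_get a → Pre_get a → Spec_get a (get a)

-- ===== LEMMAS AND PROOFS =====

-- scalar cons steps for "set to 0 on condition" folds
theorem step_zero (p : Nat → Prop) [DecidablePred p] (x : Nat) (xs : List Nat) (t : Int) :
    (if ∃ j ∈ xs, p j then 0 else (if p x then (0 : Int) else t)) =
      if ∃ j ∈ x :: xs, p j then 0 else t := by
  by_cases h1 : ∃ j ∈ xs, p j <;> by_cases h2 : p x <;> simp [h1, h2]

theorem step_keep (c : Nat → Prop) [DecidablePred c] (x : Nat) (xs : List Nat) (t : Int) :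
    (if ∃ j ∈ xs, ¬c j then 0 else (if c x then t else (0 : Int))) =
      if ∃ j ∈ x :: xs, ¬c j then 0 else t := by
  by_cases h1 : ∃ j ∈ xs, ¬c j <;> by_cases h2 : c x <;> simp [h1, h2]

theorem step_guard (p : Nat → Prop) [DecidablePred p] (x : Nat) (xs : List Nat) (t : Int) :
    (if ∃ j ∈ xs, p j then 0 else (if t ≠ 0 ∧ p x then (0 : Int) else t)) =
      if ∃ j ∈ x :: xs, p j then 0 else t := by
  by_cases h1 : ∃ j ∈ xs, p j <;> by_cases h2 : p x <;> by_cases h3 : t = 0 <;>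
    simp [h1, h2, h3]

-- characterisation of A's inner loop
theorem innerA_char (a : List (List Int)) (n i : Nat) (l : List Nat)
    (s : Int × Int × Int × Int × Int) :
    l.foldl (stepA a n i) s =
      (if ∃ j ∈ l, ¬ent a i i ≠ 0 then 0 else s.1,
       if ∃ j ∈ l, ent a i i ≠ 0 then 0 else s.2.1,
       if ∃ j ∈ l, ent a i j ≠ 0 ∧ i ≠ j ∧ ¬ent a j i ≠ 0 then 0 else s.2.2.1,
       if ∃ j ∈ l, ent a i j ≠ 0 ∧ i ≠ j ∧ ent a j i ≠ 0 then 0 else s.2.2.2.1,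
       if ∃ j ∈ l, ¬ent a i j ≠ 0 ∧ (∃ k ∈ List.range n, ent a i k ≠ 0 ∧ ent a k j ≠ 0)
         then 0 else s.2.2.2.2) := by
  induction l generalizing s with
  | nil => simp
  | cons x xs ih =>
    rw [List.foldl_cons, ih]
    refine Prod.ext ?_ (Prod.ext ?_ (Prod.ext ?_ (Prod.ext ?_ ?_)))
    · exact step_keep (fun _ => ent a i i ≠ 0) x xs s.1
    · exact step_zero (fun _ => ent a i i ≠ 0) x xs s.2.1
    · exact step_zero (fun j => ent a i j ≠ 0 ∧ i ≠ j ∧ ¬ent a j i ≠ 0) x xs s.2.2.1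
    · exact step_zero (fun j => ent a i j ≠ 0 ∧ i ≠ j ∧ ent a j i ≠ 0) x xs s.2.2.2.1
    · exact step_guard
        (fun j => ¬ent a i j ≠ 0 ∧ (∃ k ∈ List.range n, ent a i k ≠ 0 ∧ ent a k j ≠ 0))
        x xs s.2.2.2.2

-- characterisation of A's outer loop
theorem outerA_char (a : List (List Int)) (n : Nat) (l : List Nat)
    (s : Int × Int × Int × Int × Int) :
    l.foldl (fun s i => (List.range n).foldl (stepA a n i) s) s =
      (if ∃ i ∈ l, ∃ _j ∈ List.range n, ¬ent a i i ≠ 0 then 0 else s.1,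
       if ∃ i ∈ l, ∃ _j ∈ List.range n, ent a i i ≠ 0 then 0 else s.2.1,
       if ∃ i ∈ l, ∃ j ∈ List.range n, ent a i j ≠ 0 ∧ i ≠ j ∧ ¬ent a j i ≠ 0 then 0 else s.2.2.1,
       if ∃ i ∈ l, ∃ j ∈ List.range n, ent a i j ≠ 0 ∧ i ≠ j ∧ ent a j i ≠ 0 then 0 else s.2.2.2.1,
       if ∃ i ∈ l, ∃ j ∈ List.range n,
           ¬ent a i j ≠ 0 ∧ (∃ k ∈ List.range n, ent a i k ≠ 0 ∧ ent a k j ≠ 0)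
         then 0 else s.2.2.2.2) := by
  induction l generalizing s with
  | nil => simp
  | cons x xs ih =>
    rw [List.foldl_cons, ih, innerA_char]
    refine Prod.ext ?_ (Prod.ext ?_ (Prod.ext ?_ (Prod.ext ?_ ?_)))
    · exact step_zero (fun i => ∃ _j ∈ List.range n, ¬ent a i i ≠ 0) x xs s.1
    · exact step_zero (fun i => ∃ _j ∈ List.range n, ent a i i ≠ 0) x xs s.2.1
    · exact step_zero (fun i => ∃ j ∈ List.range n, ent a i j ≠ 0 ∧ i ≠ j ∧ ¬ent a j i ≠ 0) x xs s.2.2.1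
    · exact step_zero (fun i => ∃ j ∈ List.range n, ent a i j ≠ 0 ∧ i ≠ j ∧ ent a j i ≠ 0) x xs s.2.2.2.1
    · exact step_zero
        (fun i => ∃ j ∈ List.range n, ¬ent a i j ≠ 0 ∧ (∃ k ∈ List.range n, ent a i k ≠ 0 ∧ ent a k j ≠ 0))
        x xs s.2.2.2.2

-- characterisation of A itself
theorem A_char (a : List (List Int)) :
    get a =
      (if ∃ i ∈ List.range a.length, ∃ _j ∈ List.range a.length, ¬ent a i i ≠ 0 then 0 else 1,
       if ∃ i ∈ List.range a.length, ∃ _j ∈ List.range a.length, ent a i i ≠ 0 then 0 else 1,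
       if ∃ i ∈ List.range a.length, ∃ j ∈ List.range a.length,
           ent a i j ≠ 0 ∧ i ≠ j ∧ ¬ent a j i ≠ 0 then 0 else 1,
       if ∃ i ∈ List.range a.length, ∃ j ∈ List.range a.length,
           ent a i j ≠ 0 ∧ i ≠ j ∧ ent a j i ≠ 0 then 0 else 1,
       if ∃ i ∈ List.range a.length, ∃ j ∈ List.range a.length,
           ¬ent a i j ≠ 0 ∧ (∃ k ∈ List.range a.length, ent a i k ≠ 0 ∧ ent a k j ≠ 0)
         then 0 else 1) := by
  show (List.range a.length).foldl _ _ = _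
  rw [outerA_char]

-- ---- B-side lemmas ----

theorem tbit (x k : Nat) : (x >>> k &&& 1 ≠ 0) ↔ x.testBit k = true := by
  simp [Nat.testBit]

theorem foldl_mask_bit (p : Nat → Prop) [DecidablePred p] (l : List Nat) (m0 t : Nat) :
    (l.foldl (fun m j => if p j then m ||| (1 <<< j) else m) m0).testBit t
      = (m0.testBit t || decide (t ∈ l ∧ p t)) := by
  induction l generalizing m0 with
  | nil => simp
  | cons x xs ih =>
    rw [List.foldl_cons, ih]
    by_cases he : x = t
    · subst he
      by_cases hx : p x <;>
        simp [hx, Nat.testBit_or, Nat.one_shiftLeft, Nat.testBit_two_pow, List.mem_cons]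
    · have ht : decide (t = x) = false := by
        simp only [decide_eq_false_iff_not]
        exact fun h => he h.symm
      by_cases hx : p x <;>
        simp [hx, Nat.testBit_or, Nat.one_shiftLeft, Nat.testBit_two_pow, List.mem_cons, ht, he]

theorem maskB_testBit (a : List (List Int)) (n i t : Nat) :
    (maskB a n i).testBit t = decide (t < n ∧ ent a i t ≠ 0) := by
  unfold maskB
  rw [foldl_mask_bit]
  simp [List.mem_range]

theorem getD_map_range (f : Nat → Nat) (n i : Nat) (h : i < n) :
    ((List.range n).map f).getD i 0 = f i := by
  simp [List.getD_eq_getElem?_getD, List.getElem?_map, List.getElem?_range h]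

theorem foldl_reach_bit (c : Nat → Prop) [DecidablePred c] (f : Nat → Nat) (l : List Nat)
    (r0 t : Nat) :
    (l.foldl (fun r k => if c k then r ||| f k else r) r0).testBit t
      = (r0.testBit t || decide (∃ k ∈ l, c k ∧ (f k).testBit t = true)) := by
  induction l generalizing r0 with
  | nil => simp
  | cons x xs ih =>
    rw [List.foldl_cons, ih]
    by_cases hx : c x
    · simp only [hx, if_pos, Nat.testBit_or]
      by_cases hb : (f x).testBit t = true <;> simp [hb, hx] <;> tauto
    · simp [hx] <;> tauto

theorem or_eq_iff (r m : Nat) :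
    r ||| m = m ↔ ∀ t, r.testBit t = true → m.testBit t = true := by
  constructor
  · intro h t hr
    have := congrArg (fun x => x.testBit t) h
    simpa [Nat.testBit_or, hr] using this
  · intro h
    apply Nat.eq_of_testBit_eq
    intro t
    rw [Nat.testBit_or]
    cases hr : r.testBit t
    · simp
    · simp [h t hr]

theorem or_ne_iff (r m : Nat) :
    (r ||| m ≠ m) ↔ ∃ t, r.testBit t = true ∧ m.testBit t = false := by
  rw [Ne, or_eq_iff]
  push_neg
  constructor
  · rintro ⟨t, h1, h2⟩; exact ⟨t, h1, by simpa using h2⟩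
  · rintro ⟨t, h1, h2⟩; exact ⟨t, h1, by simp [h2]⟩

theorem stepBtr_eq (a : List (List Int)) (n : Nat) (t : Int) (i : Nat) (hi : i < n) :
    stepBtr n ((List.range n).map (maskB a n)) t i =
      if ∃ j ∈ List.range n, ¬ent a i j ≠ 0 ∧ (∃ k ∈ List.range n, ent a i k ≠ 0 ∧ ent a k j ≠ 0)
        then 0 else t := by
  unfold stepBtr
  rw [getD_map_range _ _ _ hi]
  refine if_congr ?_ rfl rfl
  rw [or_ne_iff]
  constructor
  · rintro ⟨u, hu, hmu⟩
    rw [foldl_reach_bit] at hu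
    simp only [Nat.zero_testBit, Bool.false_or, decide_eq_true_eq] at hu
    obtain ⟨k, hk, hck, hbk⟩ := hu
    rw [getD_map_range _ _ _ (List.mem_range.mp hk)] at hbk
    rw [maskB_testBit] at hbk hmu
    rw [tbit, maskB_testBit] at hck
    simp only [decide_eq_true_eq] at hbk hck
    simp only [decide_eq_false_iff_not] at hmu
    refine ⟨u, ?_, ?_, ⟨k, hk, hck.2, hbk.2⟩⟩
    · simpa [List.mem_range] using hbk.1
    · intro h; exact hmu ⟨hbk.1, h⟩
  · rintro ⟨j, hj, hz, k, hk, h1, h2⟩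
    refine ⟨j, ?_, ?_⟩
    · rw [foldl_reach_bit]
      simp only [Nat.zero_testBit, Bool.false_or, decide_eq_true_eq]
      refine ⟨k, hk, ?_, ?_⟩
      · rw [tbit, maskB_testBit]
        simp only [decide_eq_true_eq]
        exact ⟨by simpa [List.mem_range] using hk, h1⟩
      · rw [getD_map_range _ _ _ (List.mem_range.mp hk), maskB_testBit]
        simp only [decide_eq_true_eq]
        exact ⟨by simpa [List.mem_range] using hj, h2⟩
    · rw [maskB_testBit]
      simp only [decide_eq_false_iff_not]
      rintro ⟨-, h⟩
      exact hz h

theorem foldl_zero_if_mem (p : Nat → Prop) [DecidablePred p] (f : Int → Nat → Int)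
    (l : List Nat) (h : ∀ t x, x ∈ l → f t x = if p x then 0 else t) (t : Int) :
    l.foldl f t = if ∃ x ∈ l, p x then 0 else t := by
  induction l generalizing t with
  | nil => simp
  | cons x xs ih =>
    rw [List.foldl_cons, ih (fun t y hy => h t y (List.mem_cons_of_mem x hy)),
      h t x List.mem_cons_self, step_zero]

theorem innerB_char (a : List (List Int)) (i : Nat) (l : List Nat) (p : Int × Int) :
    l.foldl (stepBsym a i) p =
      (if ∃ j ∈ l, ¬((ent a i j ≠ 0) ↔ (ent a j i ≠ 0)) then 0 else p.1,
       if ∃ j ∈ l, ent a i j ≠ 0 ∧ ent a j i ≠ 0 then 0 else p.2) := by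
  induction l generalizing p with
  | nil => simp
  | cons x xs ih =>
    rw [List.foldl_cons, ih]
    refine Prod.ext ?_ ?_
    · exact step_zero (fun j => ¬((ent a i j ≠ 0) ↔ (ent a j i ≠ 0))) x xs p.1
    · exact step_zero (fun j => ent a i j ≠ 0 ∧ ent a j i ≠ 0) x xs p.2

theorem outerB_char (a : List (List Int)) (l : List Nat) (p : Int × Int) :
    l.foldl (fun p i => (List.range i).foldl (stepBsym a i) p) p =
      (if ∃ i ∈ l, ∃ j ∈ List.range i, ¬((ent a i j ≠ 0) ↔ (ent a j i ≠ 0)) then 0 else p.1,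
       if ∃ i ∈ l, ∃ j ∈ List.range i, ent a i j ≠ 0 ∧ ent a j i ≠ 0 then 0 else p.2) := by
  induction l generalizing p with
  | nil => simp
  | cons x xs ih =>
    rw [List.foldl_cons, ih, innerB_char]
    refine Prod.ext ?_ ?_
    · exact step_zero (fun i => ∃ j ∈ List.range i, ¬((ent a i j ≠ 0) ↔ (ent a j i ≠ 0))) x xs p.1
    · exact step_zero (fun i => ∃ j ∈ List.range i, ent a i j ≠ 0 ∧ ent a j i ≠ 0) x xs p.2

theorem B_char (a : List (List Int)) :
    get_alt a =
      (if ∀ i ∈ List.range a.length, ent a i i ≠ 0 then 1 else 0,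
       if ∃ i ∈ List.range a.length, ent a i i ≠ 0 then 0 else 1,
       if ∃ i ∈ List.range a.length, ∃ j ∈ List.range i,
           ¬((ent a i j ≠ 0) ↔ (ent a j i ≠ 0)) then 0 else 1,
       if ∃ i ∈ List.range a.length, ∃ j ∈ List.range i, ent a i j ≠ 0 ∧ ent a j i ≠ 0
         then 0 else 1,
       if ∃ i ∈ List.range a.length, ∃ j ∈ List.range a.length,
           ¬ent a i j ≠ 0 ∧ (∃ k ∈ List.range a.length, ent a i k ≠ 0 ∧ ent a k j ≠ 0)
         then 0 else 1) := by
  simp only [get_alt]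
  rw [outerB_char,
    foldl_zero_if_mem
      (fun i => ∃ j ∈ List.range a.length,
        ¬ent a i j ≠ 0 ∧ (∃ k ∈ List.range a.length, ent a i k ≠ 0 ∧ ent a k j ≠ 0))
      (stepBtr a.length ((List.range a.length).map (maskB a a.length)))
      (List.range a.length)
      (fun t i hi => stepBtr_eq a a.length t i (List.mem_range.mp hi))]
  refine Prod.ext ?_ (Prod.ext ?_ rfl)
  · simp [List.all_map, List.all_eq_true]
  · simp [List.any_map, List.any_eq_true]

-- ===== VERDICT (by name: the statement is the Claim_ definition above) =====
theorem get_spec : Claim_equal_get := by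
  intro a _hDom _hPre
  show get a = get_alt a
  rw [A_char, B_char]
  refine Prod.ext ?_ (Prod.ext ?_ (Prod.ext ?_ (Prod.ext ?_ rfl)))
  · by_cases h : ∀ i ∈ List.range a.length, ent a i i ≠ 0
    · rw [if_pos h, if_neg]
      rintro ⟨i, hi, _j, _hj, hz⟩
      exact hz (h i hi)
    · rw [if_neg h, if_pos]
      push_neg at h
      obtain ⟨i, hi, hz⟩ := h
      exact ⟨i, hi, i, hi, by simp [hz]⟩
  · refine if_congr ⟨?_, ?_⟩ rfl rfl
    · rintro ⟨i, hi, _j, _hj, h⟩; exact ⟨i, hi, h⟩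
    · rintro ⟨i, hi, h⟩; exact ⟨i, hi, i, hi, h⟩
  · refine if_congr ⟨?_, ?_⟩ rfl rfl
    · rintro ⟨i, hi, j, hj, hij, hne, hji⟩
      rcases Nat.lt_or_ge j i with hlt | hge
      · exact ⟨i, hi, j, List.mem_range.mpr hlt, fun hiff => hji (hiff.mp hij)⟩
      · have hlt : i < j := by
          rcases Nat.lt_or_ge i j with h' | h'
          · exact h'
          · exact absurd (Nat.le_antisymm hge h') hne
        exact ⟨j, hj, i, List.mem_range.mpr hlt, fun hiff => hji (hiff.mpr hij)⟩
    · rintro ⟨i, hi, j, hj, hx⟩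
      have hji : j < i := List.mem_range.mp hj
      have hin : i < a.length := List.mem_range.mp hi
      have hjn : j ∈ List.range a.length := List.mem_range.mpr (Nat.lt_trans hji hin)
      by_cases h1 : ent a i j ≠ 0
      · refine ⟨i, hi, j, hjn, h1, Nat.ne_of_gt hji, fun h2 => hx ⟨fun _ => h2, fun _ => h1⟩⟩
      · have h2 : ent a j i ≠ 0 := by
          by_contra h2
          exact hx ⟨fun hh => absurd hh h1, fun hh => absurd h2 hh⟩
        exact ⟨j, hjn, i, hi, h2, Nat.ne_of_lt hji, h1⟩
  · refine if_congr ⟨?_, ?_⟩ rfl rfl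
    · rintro ⟨i, hi, j, hj, hij, hne, hji⟩
      rcases Nat.lt_or_ge j i with hlt | hge
      · exact ⟨i, hi, j, List.mem_range.mpr hlt, hij, hji⟩
      · have hlt : i < j := by
          rcases Nat.lt_or_ge i j with h' | h'
          · exact h'
          · exact absurd (Nat.le_antisymm hge h') hne
        exact ⟨j, hj, i, List.mem_range.mpr hlt, hji, hij⟩
    · rintro ⟨i, hi, j, hj, h1, h2⟩
      have hji : j < i := List.mem_range.mp hj
      have hin : i < a.length := List.mem_range.mp hi
      exact ⟨i, hi, j, List.mem_range.mpr (Nat.lt_trans hji hin), h1, Nat.ne_of_gt hji, h2⟩
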